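-- pv_equiv track=rewrite | github.com/Kassandra465/MecanicTry | Essaie.py | create_dofList
-- ===== SOURCE A (Python) =====
-- def create_dofList(nbr_nodes):
--     dofList_final = []
--
--     for i in range(nbr_nodes):
--         start_num = i * 6 + 1
--         end_num = start_num + 6
--         line_sequence = list(range(start_num, end_num))
--         dofList_final.append(line_sequence)
--
--     return dofList_final
-- ===== SOURCE B (Python) =====
-- def create_dofList(nbr_nodes):
--     result = []
--     row = [1, 2, 3, 4, 5, 6]
--     for _ in range(nbr_nodes):
--         result.append(row)
--         row = [x + 6 for x in row]
--     return result
-- ===== Notes on version B (the rewrite author's own statement) =====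
-- stated objective: alternative
-- what changed: B maintains a running row as loop state, appending it and then shifting every entry by the per-node stride each iteration, so no range is ever computed from the node index.
import Mathlib
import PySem

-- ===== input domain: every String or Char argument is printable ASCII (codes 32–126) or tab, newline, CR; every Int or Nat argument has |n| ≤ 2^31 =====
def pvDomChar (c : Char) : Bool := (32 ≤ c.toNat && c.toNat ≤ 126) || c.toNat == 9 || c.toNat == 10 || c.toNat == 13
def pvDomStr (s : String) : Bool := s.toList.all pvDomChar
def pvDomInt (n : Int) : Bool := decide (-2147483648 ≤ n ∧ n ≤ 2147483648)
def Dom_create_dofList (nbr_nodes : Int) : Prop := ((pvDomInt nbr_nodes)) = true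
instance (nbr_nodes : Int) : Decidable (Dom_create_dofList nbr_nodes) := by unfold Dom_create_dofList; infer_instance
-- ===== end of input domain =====

-- B keeps a running row as loop state and shifts it by +6 each step, instead of computing a range per node (alternative decomposition; same cost).


-- ===== PORT A =====
def create_dofList (nbr_nodes : Int) : List (List Int) :=
  (PySem.List.pyRange 0 nbr_nodes 1).foldl
    (fun dofList_final i =>
      let start_num := i * 6 + 1
      let end_num := start_num + 6
      let line_sequence := PySem.List.pyRange start_num end_num 1
      dofList_final ++ [line_sequence])
    []

-- ===== PORT B =====
def create_dofList_alt (nbr_nodes : Int) : List (List Int) :=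
  let st := (PySem.List.pyRange 0 nbr_nodes 1).foldl
    (fun (p : List (List Int) × List Int) _ =>
      (p.1 ++ [p.2], p.2.map (fun x => x + 6)))
    ([], [1, 2, 3, 4, 5, 6])
  st.1

-- ===== PRECONDITION & SPEC =====
def Spec_create_dofList (nbr_nodes : Int) (out : List (List Int)) : Prop := out = create_dofList_alt nbr_nodes
instance (nbr_nodes : Int) (out : List (List Int)) : Decidable (Spec_create_dofList nbr_nodes out) := by unfold Spec_create_dofList; infer_instance

-- ===== CLAIM (what is proved, stated in full; the proofs are below) =====
def Claim_equal_create_dofList : Prop := ∀ (nbr_nodes : Int), Dom_create_dofList nbr_nodes → Spec_create_dofList nbr_nodes (create_dofList nbr_nodes)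

-- ===== LEMMAS AND PROOFS =====

theorem foldl_append_singleton {α β : Type} (f : α → β) :
    ∀ (l : List α) (init : List β),
      l.foldl (fun acc i => acc ++ [f i]) init = init ++ l.map f := by
  intro l
  induction l with
  | nil => simp
  | cons x xs ih => intro init; simp [List.foldl, ih]

-- invariant for B's loop: result = acc ++ one shifted copy of the row per step
theorem b_loop_invariant :
    ∀ (l : List Int) (acc : List (List Int)) (row : List Int),
      (l.foldl (fun (p : List (List Int) × List Int) _ =>
          (p.1 ++ [p.2], p.2.map (fun x => x + 6))) (acc, row)).1 =
        acc ++ (List.range l.length).map (fun (k : Nat) => row.map (fun x => x + 6 * (k : Int))) := by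
  intro l
  induction l with
  | nil => simp
  | cons x xs ih =>
    intro acc row
    rw [List.foldl_cons, ih, List.length_cons, List.range_succ_eq_map, List.map_cons,
        List.append_assoc, ← List.singleton_append]
    have h0 : List.map (fun x => x + 6 * ((0 : Nat) : Int)) row = row := by simp
    have h1 : (List.map Nat.succ (List.range xs.length)).map
        (fun (k : Nat) => row.map (fun x => x + 6 * (k : Int))) =
        (List.range xs.length).map
          (fun (k : Nat) => (row.map (fun x => x + 6)).map (fun x => x + 6 * (k : Int))) := by
      rw [List.map_map]
      simp only [Function.comp_def, List.map_map, List.map_inj_left, List.mem_range]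
      intro a _ y _
      push_cast
      ring
    rw [h0, h1]
    simp

theorem pyRange_six (a : Int) :
    PySem.List.pyRange a (a + 6) 1 = [a, a + 1, a + 2, a + 3, a + 4, a + 5] := by
  rw [PySem.List.pyRange_one, show (a + 6 - a).toNat = 6 from by omega]
  simp [List.range_succ]

-- ===== VERDICT (by name: the statement is the Claim_ definition above) =====
theorem create_dofList_spec : Claim_equal_create_dofList := by
  intro n _
  unfold Spec_create_dofList create_dofList create_dofList_alt
  rw [foldl_append_singleton, b_loop_invariant]
  simp only [List.nil_append, PySem.List.length_pyRange_one]
  rw [PySem.List.pyRange_one, List.map_map,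
      show (n - 0).toNat = n.toNat from by omega]
  apply List.map_congr_left
  intro k _
  simp only [Function.comp_apply]
  rw [show (0 : Int) + (k : Int) = (k : Int) from by ring,
      show (k : Int) * 6 + 1 + 6 = ((k : Int) * 6 + 1) + 6 from rfl, pyRange_six]
  simp only [List.map_cons, List.map_nil]
  norm_num
  omega
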